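-- pv_equiv track=rewrite | github.com/BatLancelot/PFund-Jan-Apr-2021-Retake | 08-01-Text-Processing-Lab/05-Digits-Letters-and-Other.py | string_checker
-- ===== SOURCE A (Python) =====
-- def string_checker(text):
--     digits = ''
--     chars = ''
--     other = ''
--
--     for char in text:
--         if char.isdigit():
--             digits += char
--         elif char.isalpha():
--             chars += char
--         else:
--             other += char
--     return digits, chars, other
-- ===== SOURCE B (Python) =====
-- def string_checker(text):
--     digits = ''.join(c for c in text if c.isdigit())
--     chars = ''.join(c for c in text if c.isalpha())
--     other = ''.join(c for c in text if not c.isdigit() and not c.isalpha())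
--     return digits, chars, other
-- ===== Notes on version B (the rewrite author's own statement) =====
-- stated objective: idiomatic
-- what changed: Replaces the single three-accumulator partitioning loop with three independent filtered joins over the text, one per category.
import Mathlib
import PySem

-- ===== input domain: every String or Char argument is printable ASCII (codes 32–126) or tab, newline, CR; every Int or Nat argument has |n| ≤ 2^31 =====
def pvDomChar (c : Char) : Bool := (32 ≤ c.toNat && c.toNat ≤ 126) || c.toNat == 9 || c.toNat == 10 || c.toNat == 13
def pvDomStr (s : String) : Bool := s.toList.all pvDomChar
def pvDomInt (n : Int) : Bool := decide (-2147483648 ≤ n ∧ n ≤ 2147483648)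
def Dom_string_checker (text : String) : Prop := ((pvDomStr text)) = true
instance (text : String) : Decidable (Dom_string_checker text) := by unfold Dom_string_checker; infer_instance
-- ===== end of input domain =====

-- B replaces A's single three-accumulator partitioning loop with three independent filtered joins (idiomatic; same cost).

-- ===== PORT A =====
-- A: one pass, three growing string accumulators.
def string_checker (text : String) : String × String × String :=
  (text.toList.foldl
    (fun (acc : String × String × String) char =>
      if PySem.Chars.isdigit char then (acc.1.push char, acc.2.1, acc.2.2)
      else if PySem.Chars.isalpha char then (acc.1, acc.2.1.push char, acc.2.2)
      else (acc.1, acc.2.1, acc.2.2.push char))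
    ("", "", ""))

-- ===== PORT B =====
-- B: three independent filtered scans.
def string_checker_alt (text : String) : String × String × String :=
  (String.ofList (text.toList.filter (fun c => PySem.Chars.isdigit c)),
   String.ofList (text.toList.filter (fun c => PySem.Chars.isalpha c)),
   String.ofList (text.toList.filter (fun c => !PySem.Chars.isdigit c && !PySem.Chars.isalpha c)))

-- ===== PRECONDITION & SPEC =====
def Spec_string_checker (text : String) (out : String × String × String) : Prop := out = string_checker_alt text
instance (text : String) (out : String × String × String) : Decidable (Spec_string_checker text out) := by unfold Spec_string_checker; infer_instance

-- ===== CLAIM (what is proved, stated in full; the proofs are below) =====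
def Claim_equal_string_checker : Prop := ∀ (text : String), Dom_string_checker text → Spec_string_checker text (string_checker text)

-- ===== LEMMAS AND PROOFS =====
theorem push_ofList (s : String) (h : Char) (l : List Char) :
    s.push h ++ String.ofList l = s ++ String.ofList (h :: l) := by
  apply String.toList_injective
  simp

-- A digit character is never alphabetic (the two ranges are disjoint).
theorem digit_not_alpha (c : Char) (h : PySem.Chars.isdigit c = true) :
    PySem.Chars.isalpha c = false := by
  simp only [PySem.Chars.isdigit, PySem.Chars.isalpha, PySem.Chars.isupper, PySem.Chars.islower,
    Bool.and_eq_true, Bool.or_eq_false_iff, Bool.and_eq_false_iff, decide_eq_true_eq,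
    decide_eq_false_iff_not, not_le, Char.le_def, UInt32.le_iff_toNat_le,
    show ('0'.val.toNat) = 48 from rfl, show ('9'.val.toNat) = 57 from rfl,
    show ('A'.val.toNat) = 65 from rfl, show ('Z'.val.toNat) = 90 from rfl,
    show ('a'.val.toNat) = 97 from rfl, show ('z'.val.toNat) = 122 from rfl] at *
  omega

theorem string_checker_fold (l : List Char) (d c o : String) :
    l.foldl
      (fun (acc : String × String × String) char =>
        if PySem.Chars.isdigit char then (acc.1.push char, acc.2.1, acc.2.2)
        else if PySem.Chars.isalpha char then (acc.1, acc.2.1.push char, acc.2.2)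
        else (acc.1, acc.2.1, acc.2.2.push char))
      (d, c, o)
    = (d ++ String.ofList (l.filter (fun x => PySem.Chars.isdigit x)),
       c ++ String.ofList (l.filter (fun x => PySem.Chars.isalpha x)),
       o ++ String.ofList (l.filter (fun x => !PySem.Chars.isdigit x && !PySem.Chars.isalpha x))) := by
  induction l generalizing d c o with
  | nil => simp
  | cons x t ih =>
    simp only [List.foldl_cons, List.filter_cons]
    by_cases hd : PySem.Chars.isdigit x
    · simp [hd, digit_not_alpha x hd, ih, push_ofList]
    · by_cases ha : PySem.Chars.isalpha x
      · simp [hd, ha, ih, push_ofList]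
      · simp [hd, ha, ih, push_ofList]

-- ===== VERDICT (by name: the statement is the Claim_ definition above) =====
theorem string_checker_spec : Claim_equal_string_checker := by
  intro text _
  unfold Spec_string_checker string_checker string_checker_alt
  rw [string_checker_fold]
  simp
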